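-- pv_equiv track=rewrite | github.com/sheilsplenbluli/csvwrangler | csvwrangler/crossjoin.py | semi_join
-- ===== SOURCE A (Python) =====
-- from typing import List, Dict, Any, Optional, Callable
--
-- Row = Dict[str, Any]
--
-- def semi_join(
--     left: List[Row],
--     right: List[Row],
--     keys: List[str],
-- ) -> List[Row]:
--     """Return left rows that have at least one matching key in right."""
--     right_keys = set(
--         tuple(r.get(k, "") for k in keys) for r in right
--     )
--     return [
--         l for l in left
--         if tuple(l.get(k, "") for k in keys) in right_keys
--     ]
-- ===== SOURCE B (Python) =====
-- def _hit(row, right, keys):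
--     """True iff some right row agrees with row on every key (missing -> "")."""
--     for r in right:
--         ok = True
--         for k in keys:
--             if row.get(k, "") != r.get(k, ""):
--                 ok = False
--                 break
--         if ok:
--             return True
--     return False
--
--
-- def semi_join(left, right, keys):
--     """Semi-join by direct nested scan: no index of right key tuples is built;
--     each left row is kept (in order) iff some right row matches on all keys."""
--     out = []
--     for l in left:
--         if _hit(l, right, keys):
--             out.append(l)
--     return out
-- ===== Notes on version B (the rewrite author's own statement) =====
-- stated objective: simpler
-- what changed: B drops A's precomputed set of right key tuples and its tuple construction entirely: it does the semi-join by a direct nested scan with explicit loops (for each left row, scan right for a row agreeing on every key, short-circuiting), keeping left's order and duplicates.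
import Mathlib
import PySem

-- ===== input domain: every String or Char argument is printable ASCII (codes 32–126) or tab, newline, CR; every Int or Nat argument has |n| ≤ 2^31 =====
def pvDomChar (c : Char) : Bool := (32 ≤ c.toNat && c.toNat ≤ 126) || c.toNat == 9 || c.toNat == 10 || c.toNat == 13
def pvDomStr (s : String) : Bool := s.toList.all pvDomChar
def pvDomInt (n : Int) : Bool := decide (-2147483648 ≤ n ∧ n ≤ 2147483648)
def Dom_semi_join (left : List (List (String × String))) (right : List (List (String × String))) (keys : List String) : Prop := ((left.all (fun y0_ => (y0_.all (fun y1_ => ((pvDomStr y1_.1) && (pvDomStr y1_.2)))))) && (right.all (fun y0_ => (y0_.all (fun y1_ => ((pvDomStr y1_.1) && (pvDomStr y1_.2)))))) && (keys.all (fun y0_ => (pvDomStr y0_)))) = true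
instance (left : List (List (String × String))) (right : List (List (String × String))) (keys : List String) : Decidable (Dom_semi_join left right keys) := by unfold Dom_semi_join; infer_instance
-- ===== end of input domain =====

-- B drops A's precomputed set of right key tuples and does the semi-join by a direct nested
-- scan with explicit (recursive) loops; objective: simpler, no index maintained.

-- ===== PORT A =====
-- r.get(k, "") on an association-list row: first match, "" if absent
def rowGet (r : List (String × String)) (k : String) : String := (List.lookup k r).getD ""

def semi_join (left : List (List (String × String))) (right : List (List (String × String))) (keys : List String) : List (List (String × String)) :=
  let right_keys : PySem.Set (List String) :=
    PySem.Set.ofList (right.map (fun r => keys.map (fun k => rowGet r k)))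
  left.filter (fun l => PySem.Set.contains right_keys (keys.map (fun k => rowGet l k)))

-- ===== PORT B =====
-- inner `for k in keys` loop of _hit: false at the first disagreeing key (break), true if none
def agreeOnKeys (row r : List (String × String)) : List String → Bool
  | [] => true
  | k :: ks =>
    if (List.lookup k row).getD "" != (List.lookup k r).getD "" then false
    else agreeOnKeys row r ks

-- outer `for r in right` loop of _hit: early return True on the first agreeing right row
def hit (row : List (String × String)) (right : List (List (String × String))) (keys : List String) : Bool :=
  match right with
  | [] => false
  | r :: rs => if agreeOnKeys row r keys then true else hit row rs keys

def semi_join_alt (left : List (List (String × String))) (right : List (List (String × String))) (keys : List String) : List (List (String × String)) :=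
  -- the accumulating `out` loop of B
  left.foldl (fun out l => if hit l right keys then out ++ [l] else out) []

-- ===== PRECONDITION & SPEC =====
def Spec_semi_join (left : List (List (String × String))) (right : List (List (String × String))) (keys : List String) (out : List (List (String × String))) : Prop := out = semi_join_alt left right keys
instance (left : List (List (String × String))) (right : List (List (String × String))) (keys : List String) (out : List (List (String × String))) : Decidable (Spec_semi_join left right keys out) := by unfold Spec_semi_join; infer_instance

-- ===== CLAIM (what is proved, stated in full; the proofs are below) =====
def Claim_equal_semi_join : Prop := ∀ (left : List (List (String × String))) (right : List (List (String × String))) (keys : List String), Dom_semi_join left right keys → Spec_semi_join left right keys (semi_join left right keys)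

-- ===== LEMMAS AND PROOFS =====
theorem agreeOnKeys_iff (row r : List (String × String)) (keys : List String) :
    agreeOnKeys row r keys = true ↔ ∀ k ∈ keys, rowGet row k = rowGet r k := by
  induction keys with
  | nil => simp [agreeOnKeys]
  | cons k ks ih =>
    simp only [agreeOnKeys, bne_iff_ne, ne_eq, ite_not, List.mem_cons]
    split_ifs with h
    · simp_all [rowGet]
    · simp only [false_iff]; intro hall; exact h (hall k (Or.inl rfl))

theorem hit_iff (row : List (String × String)) (right : List (List (String × String))) (keys : List String) :
    hit row right keys = true ↔ ∃ r ∈ right, ∀ k ∈ keys, rowGet row k = rowGet r k := by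
  induction right with
  | nil => simp [hit]
  | cons r rs ih =>
    simp only [hit]
    split_ifs with h
    · simp only [true_iff]
      exact ⟨r, List.mem_cons_self .., (agreeOnKeys_iff row r keys).mp h⟩
    · rw [ih]
      constructor
      · rintro ⟨r', hr', hall⟩; exact ⟨r', List.mem_cons_of_mem _ hr', hall⟩
      · rintro ⟨r', hr', hall⟩
        rcases List.mem_cons.mp hr' with rfl | hmem
        · exact absurd ((agreeOnKeys_iff row r' keys).mpr hall) (by simpa using h)
        · exact ⟨r', hmem, hall⟩

theorem foldl_append_filter (p : List (String × String) → Bool)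
    (l : List (List (String × String))) (acc : List (List (String × String))) :
    l.foldl (fun out x => if p x then out ++ [x] else out) acc = acc ++ l.filter p := by
  induction l generalizing acc with
  | nil => simp
  | cons x xs ih =>
    simp only [List.foldl_cons, List.filter_cons]
    split_ifs <;> simp [ih]

-- ===== VERDICT (by name: the statement is the Claim_ definition above) =====
theorem semi_join_spec : Claim_equal_semi_join := by
  intro left right keys _
  unfold Spec_semi_join semi_join semi_join_alt
  rw [foldl_append_filter, List.nil_append]
  apply List.filter_congr
  intro l _
  rw [Bool.eq_iff_iff, hit_iff]
  simp only [PySem.Set.contains_iff, PySem.Set.mem_ofList, List.mem_map]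
  constructor
  · rintro ⟨r, hr, hmap⟩
    exact ⟨r, hr, fun k hk => (List.map_eq_map_iff.mp hmap k hk).symm⟩
  · rintro ⟨r, hr, hall⟩
    exact ⟨r, hr, List.map_eq_map_iff.mpr fun k hk => (hall k hk).symm⟩
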